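-- pv_equiv track=rewrite | github.com/OneofGods/Loly | copa_sudamericana_real_algorithm.py | _identify_nation
-- ===== SOURCE A (Python) =====
-- def _identify_nation(team_name: str) -> str:
--     """Identify nation based on team name patterns"""
--     brazilian_indicators = ['PALMEIRAS', 'FLAMENGO', 'SAO_PAULO', 'SANTOS', 'CORINTHIANS', 'ATHLETICO', 'INTERNACIONAL', 'GREMIO']
--     argentine_indicators = ['BOCA', 'RIVER', 'INDEPENDIENTE', 'RACING', 'ESTUDIANTES', 'SAN_LORENZO', 'HURACAN']
--
--     if any(indicator in team_name for indicator in brazilian_indicators):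
--         return 'BRAZIL'
--     elif any(indicator in team_name for indicator in argentine_indicators):
--         return 'ARGENTINA'
--     elif any(indicator in team_name for indicator in ['NACIONAL', 'PENAROL']):
--         return 'URUGUAY'
--     elif any(indicator in team_name for indicator in ['COLO_COLO', 'UNIVERSIDAD']):
--         return 'CHILE'
--     elif any(indicator in team_name for indicator in ['MILLONARIOS', 'NACIONAL', 'ONCE_CALDAS']):
--         return 'COLOMBIA'
--     elif any(indicator in team_name for indicator in ['BOLIVAR', 'STRONGEST']):
--         return 'BOLIVIA'
--     elif any(indicator in team_name for indicator in ['BARCELONA', 'EMELEC']):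
--         return 'ECUADOR'
--
--     return None
-- ===== SOURCE B (Python) =====
-- _GROUPS = [
--     ('BRAZIL', ['PALMEIRAS', 'FLAMENGO', 'SAO_PAULO', 'SANTOS', 'CORINTHIANS', 'ATHLETICO', 'INTERNACIONAL', 'GREMIO']),
--     ('ARGENTINA', ['BOCA', 'RIVER', 'INDEPENDIENTE', 'RACING', 'ESTUDIANTES', 'SAN_LORENZO', 'HURACAN']),
--     ('URUGUAY', ['NACIONAL', 'PENAROL']),
--     ('CHILE', ['COLO_COLO', 'UNIVERSIDAD']),
--     ('COLOMBIA', ['MILLONARIOS', 'NACIONAL', 'ONCE_CALDAS']),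
--     ('BOLIVIA', ['BOLIVAR', 'STRONGEST']),
--     ('ECUADOR', ['BARCELONA', 'EMELEC']),
-- ]
--
-- # Pattern index: indicator -> (group priority, nation); first binding wins, so the
-- # shared 'NACIONAL' stays bound to URUGUAY (priority 2), never COLOMBIA.
-- _LOOKUP = {}
-- for _prio, (_nation, _inds) in enumerate(_GROUPS):
--     for _ind in _inds:
--         _LOOKUP.setdefault(_ind, (_prio, _nation))
-- _LENGTHS = sorted({len(_ind) for _ind in _LOOKUP})
--
-- def _identify_nation(team_name: str) -> str:
--     # Scan the text's positions once, hashing each candidate substring into the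
--     # pattern index (multi-pattern matching), and keep the lowest-priority hit.
--     best = None
--     for j in range(len(team_name)):
--         for L in _LENGTHS:
--             hit = _LOOKUP.get(team_name[j:j + L])
--             if hit is not None and (best is None or hit[0] < best[0]):
--                 best = hit
--     return best[1] if best is not None else None
-- ===== Notes on version B (the rewrite author's own statement) =====
-- stated objective: alternative
-- what changed: Replaces A's per-pattern substring searches (any(ind in name) per nation branch) with a multi-pattern scan: one pass over the text's positions that hashes each candidate slice into a precomputed indicator->(priority,nation) dictionary and keeps the lowest-priority hit.
import Mathlib
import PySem

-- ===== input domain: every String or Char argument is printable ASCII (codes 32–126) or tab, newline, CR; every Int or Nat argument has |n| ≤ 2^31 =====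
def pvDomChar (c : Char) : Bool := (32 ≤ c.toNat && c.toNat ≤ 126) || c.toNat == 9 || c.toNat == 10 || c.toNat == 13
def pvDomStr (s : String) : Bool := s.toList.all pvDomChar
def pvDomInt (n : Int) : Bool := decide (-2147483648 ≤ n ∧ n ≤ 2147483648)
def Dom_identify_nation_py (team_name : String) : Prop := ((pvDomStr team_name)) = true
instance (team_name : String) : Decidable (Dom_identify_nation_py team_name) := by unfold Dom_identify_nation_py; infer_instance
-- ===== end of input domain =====

-- B replaces A's per-pattern substring searches with a multi-pattern scan: one pass over
-- the text's positions, hashing each candidate slice into a precomputed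
-- indicator -> (priority, nation) dictionary and keeping the lowest-priority hit.

-- ===== PORT A =====
def identify_nation_py (team_name : String) : Option String :=
  let brazilian_indicators := ["PALMEIRAS", "FLAMENGO", "SAO_PAULO", "SANTOS", "CORINTHIANS", "ATHLETICO", "INTERNACIONAL", "GREMIO"]
  let argentine_indicators := ["BOCA", "RIVER", "INDEPENDIENTE", "RACING", "ESTUDIANTES", "SAN_LORENZO", "HURACAN"]
  if brazilian_indicators.any (fun ind => PySem.Str.isIn ind team_name) then some "BRAZIL"
  else if argentine_indicators.any (fun ind => PySem.Str.isIn ind team_name) then some "ARGENTINA"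
  else if ["NACIONAL", "PENAROL"].any (fun ind => PySem.Str.isIn ind team_name) then some "URUGUAY"
  else if ["COLO_COLO", "UNIVERSIDAD"].any (fun ind => PySem.Str.isIn ind team_name) then some "CHILE"
  else if ["MILLONARIOS", "NACIONAL", "ONCE_CALDAS"].any (fun ind => PySem.Str.isIn ind team_name) then some "COLOMBIA"
  else if ["BOLIVAR", "STRONGEST"].any (fun ind => PySem.Str.isIn ind team_name) then some "BOLIVIA"
  else if ["BARCELONA", "EMELEC"].any (fun ind => PySem.Str.isIn ind team_name) then some "ECUADOR"
  else none

-- ===== PORT B =====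
-- _GROUPS from Source B
def pvGroups : List (String × List String) :=
  [("BRAZIL", ["PALMEIRAS", "FLAMENGO", "SAO_PAULO", "SANTOS", "CORINTHIANS", "ATHLETICO", "INTERNACIONAL", "GREMIO"]),
   ("ARGENTINA", ["BOCA", "RIVER", "INDEPENDIENTE", "RACING", "ESTUDIANTES", "SAN_LORENZO", "HURACAN"]),
   ("URUGUAY", ["NACIONAL", "PENAROL"]),
   ("CHILE", ["COLO_COLO", "UNIVERSIDAD"]),
   ("COLOMBIA", ["MILLONARIOS", "NACIONAL", "ONCE_CALDAS"]),
   ("BOLIVIA", ["BOLIVAR", "STRONGEST"]),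
   ("ECUADOR", ["BARCELONA", "EMELEC"])]

-- _LOOKUP: the setdefault loop of Source B (first binding wins)
def pvLookup : PySem.Dict String (Int × String) :=
  (PySem.List.enumerate pvGroups 0).foldl
    (fun d pg => pg.2.2.foldl (fun d ind => d.setdefault ind (pg.1, pg.2.1)) d)
    PySem.Dict.empty

-- _LENGTHS = sorted({len(ind) for ind in _LOOKUP})
def pvLengths : List Int :=
  PySem.List.sorted (PySem.Set.ofList ((PySem.Dict.keys pvLookup).map (fun ind => PySem.Str.len ind))) (fun x => x) false

-- body of the inner loop: hit = _LOOKUP.get(team_name[j:j+L]); if hit and better: best = hit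
def pvInner (team_name : String) (j : Int) (best : Option (Int × String)) (L : Int) : Option (Int × String) :=
  match PySem.Dict.get? pvLookup (PySem.Str.slice team_name (some j) (some (j + L))) with
  | some hit =>
      match best with
      | none => some hit
      | some b => if hit.1 < b.1 then some hit else some b
  | none => best

def identify_nation_py_alt (team_name : String) : Option String :=
  let best := (PySem.List.pyRange 0 (PySem.Str.len team_name) 1).foldl
      (fun best j => pvLengths.foldl (pvInner team_name j) best) none
  match best with
  | some b => some b.2
  | none => none

-- ===== PRECONDITION & SPEC =====
def Spec_identify_nation_py (team_name : String) (out : Option String) : Prop := out = identify_nation_py_alt team_name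
instance (team_name : String) (out : Option String) : Decidable (Spec_identify_nation_py team_name out) := by unfold Spec_identify_nation_py; infer_instance

-- ===== CLAIM (what is proved, stated in full; the proofs are below) =====
def Claim_equal_identify_nation_py : Prop := ∀ (team_name : String), Dom_identify_nation_py team_name → Spec_identify_nation_py team_name (identify_nation_py team_name)

-- ===== LEMMAS AND PROOFS =====

-- the literal contents of pvLookup
def pvItems : List (String × (Int × String)) :=
  [("PALMEIRAS", (0, "BRAZIL")), ("FLAMENGO", (0, "BRAZIL")), ("SAO_PAULO", (0, "BRAZIL")),
   ("SANTOS", (0, "BRAZIL")), ("CORINTHIANS", (0, "BRAZIL")), ("ATHLETICO", (0, "BRAZIL")),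
   ("INTERNACIONAL", (0, "BRAZIL")), ("GREMIO", (0, "BRAZIL")),
   ("BOCA", (1, "ARGENTINA")), ("RIVER", (1, "ARGENTINA")), ("INDEPENDIENTE", (1, "ARGENTINA")),
   ("RACING", (1, "ARGENTINA")), ("ESTUDIANTES", (1, "ARGENTINA")), ("SAN_LORENZO", (1, "ARGENTINA")),
   ("HURACAN", (1, "ARGENTINA")),
   ("NACIONAL", (2, "URUGUAY")), ("PENAROL", (2, "URUGUAY")),
   ("COLO_COLO", (3, "CHILE")), ("UNIVERSIDAD", (3, "CHILE")),
   ("MILLONARIOS", (4, "COLOMBIA")), ("ONCE_CALDAS", (4, "COLOMBIA")),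
   ("BOLIVAR", (5, "BOLIVIA")), ("STRONGEST", (5, "BOLIVIA")),
   ("BARCELONA", (6, "ECUADOR")), ("EMELEC", (6, "ECUADOR"))]

def pvNation (p : Int) : String :=
  if p = 0 then "BRAZIL" else if p = 1 then "ARGENTINA" else if p = 2 then "URUGUAY"
  else if p = 3 then "CHILE" else if p = 4 then "COLOMBIA" else if p = 5 then "BOLIVIA" else "ECUADOR"

def pvUpd (best : Option (Int × String)) (h : Int × String) : Option (Int × String) :=
  match best with
  | none => some h
  | some b => if h.1 < b.1 then some h else some b

def pvKeys (team_name : String) : List String :=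
  (PySem.List.pyRange 0 (PySem.Str.len team_name) 1).flatMap
    (fun j => pvLengths.map (fun L => PySem.Str.slice team_name (some j) (some (j + L))))

def pvHits (team_name : String) : List (Int × String) :=
  (pvKeys team_name).filterMap pvLookup.get?

lemma pvLookup_eq : pvLookup = PySem.Dict.mk pvItems := by decide

lemma pvLengths_eq : pvLengths = [4, 5, 6, 7, 8, 9, 11, 13] := by decide

lemma get?_mk_eq_some_iff {κ ν : Type} [BEq κ] [LawfulBEq κ] (items : List (κ × ν))
    (hnd : (items.map Prod.fst).Nodup) (k : κ) (h : ν) :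
    (PySem.Dict.mk items).get? k = some h ↔ (k, h) ∈ items := by
  induction items with
  | nil => simp [PySem.Dict.get?]
  | cons a rest ih =>
      simp only [List.map_cons, List.nodup_cons] at hnd
      rw [PySem.Dict.get?_mk_cons]
      by_cases hk : a.1 = k
      · subst hk
        simp only [beq_self_eq_true, if_true, List.mem_cons]
        constructor
        · rintro h'; injection h' with h'; exact Or.inl (by cases a; simp_all)
        · rintro (h' | h')
          · cases a; simp_all
          · exact absurd (List.mem_map.mpr ⟨_, h', rfl⟩) hnd.1
      · have : (a.1 == k) = false := beq_eq_false_iff_ne.mpr hk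
        rw [this]
        simp only [Bool.false_eq_true, if_false, List.mem_cons]
        rw [ih hnd.2]
        constructor
        · exact Or.inr
        · rintro (h' | h')
          · cases a; simp_all
          · exact h'

lemma pvLookup_get?_iff (k : String) (h : Int × String) :
    pvLookup.get? k = some h ↔ (k, h) ∈ pvItems := by
  rw [pvLookup_eq]
  exact get?_mk_eq_some_iff pvItems (by decide) k h

-- a slice drawn by the scan is an infix, hence its indicator occurs in the text
lemma slice_isIn (t : String) (j L : Int) (hj : 0 ≤ j) (hL : 0 ≤ L) (ind : String)
    (hsl : PySem.Str.slice t (some j) (some (j + L)) = ind) :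
    PySem.Str.isIn ind t = true := by
  rw [PySem.Str.isIn_iff_infix]
  have h1 : ind.toList = PySem.Chars.slice t.toList (some j) (some (j + L)) := by
    rw [← hsl, PySem.Str.toList_slice]
  rw [PySem.Chars.slice_eq_listSlice] at h1
  rw [PySem.List.slice_toNat] at h1
  · rw [h1]
    exact List.infix_iff_prefix_suffix.mpr
      ⟨t.toList.drop j.toNat, List.take_prefix _ _, List.drop_suffix _ _⟩
  · exact hj
  · omega

-- conversely every occurring indicator of admissible length is produced by the scan
lemma isIn_mem_keys (t ind : String) (hin : PySem.Str.isIn ind t = true)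
    (hne : ind.toList ≠ []) (hLmem : ((ind.toList.length : Int)) ∈ pvLengths) :
    ind ∈ pvKeys t := by
  have hinf : ind.toList <:+: t.toList := (PySem.Str.isIn_iff_infix ind t).mp hin
  have hisin : PySem.Chars.isIn ind.toList t.toList = true :=
    (PySem.Chars.isIn_iff_infix _ _).mpr hinf
  obtain ⟨j, hpre⟩ := (PySem.Chars.exists_prefix_drop_iff_isIn _ _).mpr hisin
  have hjlt : j < t.toList.length := by
    by_contra hge
    have hd : t.toList.drop j = [] := List.drop_eq_nil_of_le (by omega)
    rw [hd] at hpre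
    exact hne (List.prefix_nil.mp hpre)
  have hslice : PySem.Str.slice t (some (j : Int)) (some ((j : Int) + (ind.toList.length : Int))) = ind := by
    apply String.toList_inj.mp
    rw [PySem.Str.toList_slice, PySem.Chars.slice_eq_listSlice, PySem.List.slice_natCast_add]
    exact (List.prefix_iff_eq_take.mp hpre).symm
  refine List.mem_flatMap.mpr ⟨(j : Int), ?_, List.mem_map.mpr ⟨(ind.toList.length : Int), hLmem, hslice⟩⟩
  rw [PySem.List.mem_pyRange_one]
  refine ⟨by omega, ?_⟩
  simp only [PySem.Str.len_eq]
  exact_mod_cast hjlt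

-- every table entry whose indicator occurs in the text is a hit of the scan
lemma hit_up (t ind : String) (h : Int × String) (hmem : (ind, h) ∈ pvItems)
    (hin : PySem.Str.isIn ind t = true) : h ∈ pvHits t := by
  have hshape : ind.toList ≠ [] ∧ ((ind.toList.length : Int)) ∈ pvLengths := by
    fin_cases hmem <;> exact ⟨by decide, by decide⟩
  exact List.mem_filterMap.mpr ⟨ind, isIn_mem_keys t ind hin hshape.1 hshape.2,
    (pvLookup_get?_iff ind h).mpr hmem⟩

-- every hit of the scan comes from a table entry whose indicator occurs in the text
lemma hit_down (t : String) (h : Int × String) (hh : h ∈ pvHits t) :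
    ∃ ind, (ind, h) ∈ pvItems ∧ PySem.Str.isIn ind t = true := by
  obtain ⟨k, hk, hget⟩ := List.mem_filterMap.mp hh
  obtain ⟨j, hj, hk'⟩ := List.mem_flatMap.mp hk
  obtain ⟨L, hLm, hsl⟩ := List.mem_map.mp hk'
  have hj0 : 0 ≤ j := ((PySem.List.mem_pyRange_one).mp hj).1
  have hL0 : 0 ≤ L := by rw [pvLengths_eq] at hLm; fin_cases hLm <;> decide
  exact ⟨k, (pvLookup_get?_iff k h).mp hget, slice_isIn t j L hj0 hL0 k hsl⟩

-- flattening the double loop: B's accumulator = fold of pvUpd over the hits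
lemma foldl_keys_eq_hits (ks : List String) (b : Option (Int × String)) :
    ks.foldl (fun best k =>
        match pvLookup.get? k with
        | some hit => pvUpd best hit
        | none => best) b
      = (ks.filterMap pvLookup.get?).foldl pvUpd b := by
  induction ks generalizing b with
  | nil => rfl
  | cons k ks ih =>
      simp only [List.foldl_cons, List.filterMap_cons]
      cases pvLookup.get? k <;> simp [ih]

-- the pvUpd fold computes the minimum priority (nations are a function of priority)
lemma foldl_upd_min (hs : List (Int × String)) (b : Option Int)
    (hfun : ∀ h ∈ hs, h.2 = pvNation h.1) :
    hs.foldl pvUpd (b.map (fun p => (p, pvNation p)))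
      = (hs.foldl (fun b h => some (match b with | none => h.1 | some p => min p h.1)) b).map
          (fun p => (p, pvNation p)) := by
  induction hs generalizing b with
  | nil => rfl
  | cons h hs ih =>
      have hh : h = (h.1, pvNation h.1) := by
        have := hfun h (List.mem_cons_self)
        cases h; simp_all
      simp only [List.foldl_cons]
      rw [← ih (some (match b with | none => h.1 | some p => min p h.1))
            (fun x hx => hfun x (List.mem_cons_of_mem _ hx))]
      congr 1
      cases b with
      | none => simp [pvUpd, ← hh]
      | some p =>
          simp only [Option.map_some, pvUpd]
          by_cases hlt : h.1 < p
          · rw [if_pos hlt]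
            have hmin : min p h.1 = h.1 := by omega
            rw [hmin, ← hh]
          · rw [if_neg hlt]
            have hmin : min p h.1 = p := by omega
            rw [hmin]

lemma foldl_min_eq_min? (l : List Int) :
    l.foldl (fun b q => some (match b with | none => q | some p => min p q)) none = l.min? := by
  cases l with
  | nil => rfl
  | cons a l =>
      rw [List.min?_cons']
      simp only [List.foldl_cons]
      induction l generalizing a with
      | nil => rfl
      | cons c l ih => simp only [List.foldl_cons]; exact ih (min a c)

-- B's result, characterised: the nation of the minimum hit priority
lemma alt_eq_min (t : String) :
    identify_nation_py_alt t = (((pvHits t).map Prod.fst).min?).map pvNation := by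
  have h1 : (PySem.List.pyRange 0 (PySem.Str.len t) 1).foldl
      (fun best j => pvLengths.foldl (pvInner t j) best) none
      = (pvKeys t).foldl (fun best k =>
          match pvLookup.get? k with
          | some hit => pvUpd best hit
          | none => best) none := by
    have hfun_eq : (fun (best : Option (Int × String)) (j : Int) => pvLengths.foldl (pvInner t j) best)
        = fun best j => (pvLengths.map (fun L => PySem.Str.slice t (some j) (some (j + L)))).foldl
            (fun best k => match pvLookup.get? k with | some hit => pvUpd best hit | none => best) best := by
      funext b j
      rw [List.foldl_map]
      rfl
    rw [pvKeys, List.foldl_flatMap, hfun_eq]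
  have hfun : ∀ h ∈ pvHits t, h.2 = pvNation h.1 := by
    intro h hh
    obtain ⟨ind, hmem, _⟩ := hit_down t h hh
    fin_cases hmem <;> decide
  have h2 := foldl_upd_min (pvHits t) none hfun
  simp only [Option.map_none] at h2
  have hph : (pvKeys t).filterMap pvLookup.get? = pvHits t := rfl
  unfold identify_nation_py_alt
  rw [h1, foldl_keys_eq_hits, hph, h2]
  have h3 : (pvHits t).foldl (fun b h => some (match b with | none => h.1 | some p => min p h.1)) none
      = ((pvHits t).map Prod.fst).min? := by
    rw [← foldl_min_eq_min?, List.foldl_map]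
  rw [h3]
  cases ((pvHits t).map Prod.fst).min? <;> rfl

-- ===== VERDICT (by name: the statement is the Claim_ definition above) =====
theorem identify_nation_py_spec : Claim_equal_identify_nation_py := by
  intro t _
  show identify_nation_py t = identify_nation_py_alt t
  rw [alt_eq_min]
  have lb : ∀ (g : Int),
      (∀ ind h, (ind, h) ∈ pvItems → PySem.Str.isIn ind t = true → g ≤ h.1) →
      ∀ x ∈ (pvHits t).map Prod.fst, g ≤ x := by
    intro g hf x hx
    obtain ⟨h, hh, rfl⟩ := List.mem_map.mp hx
    obtain ⟨ind, hmem, hin⟩ := hit_down t h hh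
    exact hf ind h hmem hin
  have meml : ∀ (ind : String) (h : Int × String), (ind, h) ∈ pvItems →
      PySem.Str.isIn ind t = true → h.1 ∈ (pvHits t).map Prod.fst := by
    intro ind h hmem hin
    exact List.mem_map.mpr ⟨h, hit_up t ind h hmem hin, rfl⟩
  by_cases h0 : (["PALMEIRAS", "FLAMENGO", "SAO_PAULO", "SANTOS", "CORINTHIANS", "ATHLETICO", "INTERNACIONAL", "GREMIO"].any (fun ind => PySem.Str.isIn ind t)) = true
  · have hm : ((pvHits t).map Prod.fst).min? = some 0 := by
      refine List.min?_eq_some_iff.mpr ⟨?_, lb 0 ?_⟩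
      · obtain ⟨ind, hind, hin⟩ := List.any_eq_true.mp h0
        fin_cases hind <;>
          first
            | (refine meml _ ((0 : Int), "BRAZIL") ?_ hin; decide)
      · intro ind h hmem hin
        fin_cases hmem <;>
          first
            | decide
    simp only [identify_nation_py]
    rw [hm, if_pos h0]
    decide
  · by_cases h1 : (["BOCA", "RIVER", "INDEPENDIENTE", "RACING", "ESTUDIANTES", "SAN_LORENZO", "HURACAN"].any (fun ind => PySem.Str.isIn ind t)) = true
    · have hm : ((pvHits t).map Prod.fst).min? = some 1 := by
        refine List.min?_eq_some_iff.mpr ⟨?_, lb 1 ?_⟩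
        · obtain ⟨ind, hind, hin⟩ := List.any_eq_true.mp h1
          fin_cases hind <;>
            first
              | (refine meml _ ((1 : Int), "ARGENTINA") ?_ hin; decide)
        · intro ind h hmem hin
          fin_cases hmem <;>
            first
              | decide
              | (refine absurd ?_ h0; exact List.any_eq_true.mpr ⟨_, by decide, hin⟩)
      simp only [identify_nation_py]
      rw [hm, if_neg h0, if_pos h1]
      decide
    · by_cases h2 : (["NACIONAL", "PENAROL"].any (fun ind => PySem.Str.isIn ind t)) = true
      · have hm : ((pvHits t).map Prod.fst).min? = some 2 := by
          refine List.min?_eq_some_iff.mpr ⟨?_, lb 2 ?_⟩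
          · obtain ⟨ind, hind, hin⟩ := List.any_eq_true.mp h2
            fin_cases hind <;>
              first
                | (refine meml _ ((2 : Int), "URUGUAY") ?_ hin; decide)
          · intro ind h hmem hin
            fin_cases hmem <;>
              first
                | decide
                | (refine absurd ?_ h0; exact List.any_eq_true.mpr ⟨_, by decide, hin⟩)
                | (refine absurd ?_ h1; exact List.any_eq_true.mpr ⟨_, by decide, hin⟩)
        simp only [identify_nation_py]
        rw [hm, if_neg h0, if_neg h1, if_pos h2]
        decide
      · by_cases h3 : (["COLO_COLO", "UNIVERSIDAD"].any (fun ind => PySem.Str.isIn ind t)) = true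
        · have hm : ((pvHits t).map Prod.fst).min? = some 3 := by
            refine List.min?_eq_some_iff.mpr ⟨?_, lb 3 ?_⟩
            · obtain ⟨ind, hind, hin⟩ := List.any_eq_true.mp h3
              fin_cases hind <;>
                first
                  | (refine meml _ ((3 : Int), "CHILE") ?_ hin; decide)
            · intro ind h hmem hin
              fin_cases hmem <;>
                first
                  | decide
                  | (refine absurd ?_ h0; exact List.any_eq_true.mpr ⟨_, by decide, hin⟩)
                  | (refine absurd ?_ h1; exact List.any_eq_true.mpr ⟨_, by decide, hin⟩)
                  | (refine absurd ?_ h2; exact List.any_eq_true.mpr ⟨_, by decide, hin⟩)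
          simp only [identify_nation_py]
          rw [hm, if_neg h0, if_neg h1, if_neg h2, if_pos h3]
          decide
        · by_cases h4 : (["MILLONARIOS", "NACIONAL", "ONCE_CALDAS"].any (fun ind => PySem.Str.isIn ind t)) = true
          · have hm : ((pvHits t).map Prod.fst).min? = some 4 := by
              refine List.min?_eq_some_iff.mpr ⟨?_, lb 4 ?_⟩
              · obtain ⟨ind, hind, hin⟩ := List.any_eq_true.mp h4
                fin_cases hind <;>
                  first
                    | (refine meml _ ((4 : Int), "COLOMBIA") ?_ hin; decide)
                    | (refine absurd ?_ h2; exact List.any_eq_true.mpr ⟨_, by decide, hin⟩)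
              · intro ind h hmem hin
                fin_cases hmem <;>
                  first
                    | decide
                    | (refine absurd ?_ h0; exact List.any_eq_true.mpr ⟨_, by decide, hin⟩)
                    | (refine absurd ?_ h1; exact List.any_eq_true.mpr ⟨_, by decide, hin⟩)
                    | (refine absurd ?_ h2; exact List.any_eq_true.mpr ⟨_, by decide, hin⟩)
                    | (refine absurd ?_ h3; exact List.any_eq_true.mpr ⟨_, by decide, hin⟩)
            simp only [identify_nation_py]
            rw [hm, if_neg h0, if_neg h1, if_neg h2, if_neg h3, if_pos h4]
            decide
          · by_cases h5 : (["BOLIVAR", "STRONGEST"].any (fun ind => PySem.Str.isIn ind t)) = true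
            · have hm : ((pvHits t).map Prod.fst).min? = some 5 := by
                refine List.min?_eq_some_iff.mpr ⟨?_, lb 5 ?_⟩
                · obtain ⟨ind, hind, hin⟩ := List.any_eq_true.mp h5
                  fin_cases hind <;>
                    first
                      | (refine meml _ ((5 : Int), "BOLIVIA") ?_ hin; decide)
                · intro ind h hmem hin
                  fin_cases hmem <;>
                    first
                      | decide
                      | (refine absurd ?_ h0; exact List.any_eq_true.mpr ⟨_, by decide, hin⟩)
                      | (refine absurd ?_ h1; exact List.any_eq_true.mpr ⟨_, by decide, hin⟩)
                      | (refine absurd ?_ h2; exact List.any_eq_true.mpr ⟨_, by decide, hin⟩)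
                      | (refine absurd ?_ h3; exact List.any_eq_true.mpr ⟨_, by decide, hin⟩)
                      | (refine absurd ?_ h4; exact List.any_eq_true.mpr ⟨_, by decide, hin⟩)
              simp only [identify_nation_py]
              rw [hm, if_neg h0, if_neg h1, if_neg h2, if_neg h3, if_neg h4, if_pos h5]
              decide
            · by_cases h6 : (["BARCELONA", "EMELEC"].any (fun ind => PySem.Str.isIn ind t)) = true
              · have hm : ((pvHits t).map Prod.fst).min? = some 6 := by
                  refine List.min?_eq_some_iff.mpr ⟨?_, lb 6 ?_⟩
                  · obtain ⟨ind, hind, hin⟩ := List.any_eq_true.mp h6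
                    fin_cases hind <;>
                      first
                        | (refine meml _ ((6 : Int), "ECUADOR") ?_ hin; decide)
                  · intro ind h hmem hin
                    fin_cases hmem <;>
                      first
                        | decide
                        | (refine absurd ?_ h0; exact List.any_eq_true.mpr ⟨_, by decide, hin⟩)
                        | (refine absurd ?_ h1; exact List.any_eq_true.mpr ⟨_, by decide, hin⟩)
                        | (refine absurd ?_ h2; exact List.any_eq_true.mpr ⟨_, by decide, hin⟩)
                        | (refine absurd ?_ h3; exact List.any_eq_true.mpr ⟨_, by decide, hin⟩)
                        | (refine absurd ?_ h4; exact List.any_eq_true.mpr ⟨_, by decide, hin⟩)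
                        | (refine absurd ?_ h5; exact List.any_eq_true.mpr ⟨_, by decide, hin⟩)
                simp only [identify_nation_py]
                rw [hm, if_neg h0, if_neg h1, if_neg h2, if_neg h3, if_neg h4, if_neg h5, if_pos h6]
                decide
              · have hnil : (pvHits t).map Prod.fst = [] := by
                  rw [List.eq_nil_iff_forall_not_mem]
                  intro x hx
                  obtain ⟨h, hh, rfl⟩ := List.mem_map.mp hx
                  obtain ⟨ind, hmem, hin⟩ := hit_down t h hh
                  fin_cases hmem <;>
                    first
                      | (refine absurd ?_ h0; exact List.any_eq_true.mpr ⟨_, by decide, hin⟩)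
                      | (refine absurd ?_ h1; exact List.any_eq_true.mpr ⟨_, by decide, hin⟩)
                      | (refine absurd ?_ h2; exact List.any_eq_true.mpr ⟨_, by decide, hin⟩)
                      | (refine absurd ?_ h3; exact List.any_eq_true.mpr ⟨_, by decide, hin⟩)
                      | (refine absurd ?_ h4; exact List.any_eq_true.mpr ⟨_, by decide, hin⟩)
                      | (refine absurd ?_ h5; exact List.any_eq_true.mpr ⟨_, by decide, hin⟩)
                      | (refine absurd ?_ h6; exact List.any_eq_true.mpr ⟨_, by decide, hin⟩)
                simp only [identify_nation_py]
                rw [if_neg h0, if_neg h1, if_neg h2, if_neg h3, if_neg h4, if_neg h5, if_neg h6, hnil]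
                rfl
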